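-- pv_equiv track=rewrite | github.com/diksha12p/DSA_Practice_Problems | Perfect Subarray.py | perfect_subarray
-- ===== SOURCE A (Python) =====
-- from typing import List
--
-- def perfect_subarray(arr: List[int]) -> int:
--     curr_sum, min_sum, count, d = 0, 0, 0, {0 : 1}
--     for i in range(len(arr)):
--         curr_sum += arr[i]
--         min_sum, j = min(min_sum, curr_sum), 0
--         while (curr_sum - j*j) >= min_sum:
--             if (curr_sum - j*j) in d.keys():
--                 count += d[curr_sum - j*j]
--             j += 1
--         if curr_sum in d.keys():
--             d[curr_sum] += 1
--         else:
--             d[curr_sum] = 1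
--     return count
-- ===== SOURCE B (Python) =====
-- from typing import List
--
-- def _is_square(s: int) -> bool:
--     if s < 0:
--         return False
--     r = 0
--     while (r + 1) * (r + 1) <= s:
--         r += 1
--     return r * r == s
--
-- def perfect_subarray(arr: List[int]) -> int:
--     count = 0
--     ending_here = []  # sums of all subarrays ending at the current element
--     for x in arr:
--         ending_here = [s + x for s in ending_here] + [x]
--         for s in ending_here:
--             if _is_square(s):
--                 count += 1
--     return count
-- ===== Notes on version B (the rewrite author's own statement) =====
-- stated objective: simpler
-- what changed: Replaced the prefix-sum dictionary with square enumeration pruned by the running minimum prefix sum by a direct two-level enumeration that maintains the list of sums of subarrays ending at the current element and tests each sum for being a perfect square with a hand-rolled integer-sqrt loop.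
import Mathlib
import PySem

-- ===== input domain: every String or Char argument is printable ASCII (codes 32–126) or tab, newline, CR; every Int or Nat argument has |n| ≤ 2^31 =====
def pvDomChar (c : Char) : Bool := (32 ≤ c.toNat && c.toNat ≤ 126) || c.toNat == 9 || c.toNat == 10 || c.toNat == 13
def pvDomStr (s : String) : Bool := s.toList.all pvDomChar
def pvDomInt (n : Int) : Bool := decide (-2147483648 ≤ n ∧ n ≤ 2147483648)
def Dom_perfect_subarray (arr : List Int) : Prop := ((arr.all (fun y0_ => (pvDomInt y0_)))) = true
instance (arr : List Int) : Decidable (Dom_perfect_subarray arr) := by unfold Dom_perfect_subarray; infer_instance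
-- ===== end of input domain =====

-- B changes the algorithm (subarray-sums-ending-here list + integer-sqrt test instead of a
-- prefix-sum dictionary with square enumeration); objective: simpler.

-- ===== PORT A =====
-- the inner 'while (curr_sum - j*j) >= min_sum' loop of A
def aWhile (d : PySem.Dict Int Int) (curr_sum min_sum j count : Int) : Int :=
  if h : min_sum ≤ curr_sum - j * j then
    let count := if d.contains (curr_sum - j * j) then count + d.getD (curr_sum - j * j) 0 else count
    aWhile d curr_sum min_sum (j + 1) count
  else count
termination_by (curr_sum - min_sum + 1 - j).toNat
decreasing_by
  have hj : j ≤ j * j := by nlinarith [mul_self_nonneg (2 * j - 1)]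
  omega

def perfect_subarray (arr : List Int) : Int :=
  let init : Int × Int × Int × PySem.Dict Int Int := (0, 0, 0, (PySem.Dict.empty.insert 0 1))
  let res := (PySem.List.pyRange 0 (PySem.List.len arr) 1).foldl (fun st i =>
      let curr_sum := st.1 + PySem.List.pyGetD arr i 0
      let min_sum := min st.2.1 curr_sum
      let count := aWhile st.2.2.2 curr_sum min_sum 0 st.2.2.1
      let d := if st.2.2.2.contains curr_sum
               then st.2.2.2.insert curr_sum (st.2.2.2.getD curr_sum 0 + 1)
               else st.2.2.2.insert curr_sum 1
      (curr_sum, min_sum, count, d)) init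
  res.2.2.1

-- ===== PORT B =====
-- the 'while (r+1)*(r+1) <= s: r += 1' loop of B's _is_square
def isqLoop (s r : Int) : Int :=
  if h : (r + 1) * (r + 1) ≤ s then isqLoop s (r + 1) else r
termination_by (s + 1 - r).toNat
decreasing_by
  have hr : r + 1 ≤ (r + 1) * (r + 1) := by nlinarith [mul_self_nonneg (2 * (r + 1) - 1)]
  omega

def is_square (s : Int) : Bool :=
  if s < 0 then false
  else isqLoop s 0 * isqLoop s 0 == s

def perfect_subarray_alt (arr : List Int) : Int :=
  let res := arr.foldl (fun (st : List Int × Int) x =>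
      let ending := st.1.map (fun s => s + x) ++ [x]
      let count := ending.foldl (fun c s => if is_square s then c + 1 else c) st.2
      (ending, count)) ([], 0)
  res.2

-- ===== PRECONDITION & SPEC =====
def Spec_perfect_subarray (arr : List Int) (out : Int) : Prop := out = perfect_subarray_alt arr
instance (arr : List Int) (out : Int) : Decidable (Spec_perfect_subarray arr out) := by unfold Spec_perfect_subarray; infer_instance

-- ===== CLAIM (what is proved, stated in full; the proofs are below) =====
def Claim_equal_perfect_subarray : Prop := ∀ (arr : List Int), Dom_perfect_subarray arr → Spec_perfect_subarray arr (perfect_subarray arr)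

-- ===== LEMMAS AND PROOFS =====

-- 's is a perfect square with root ≥ j' (canonical root via Nat.sqrt)
def rootGe (j s : Int) : Bool :=
  decide (0 ≤ s ∧ ((Nat.sqrt s.toNat : Int) * (Nat.sqrt s.toNat : Int) = s) ∧ j ≤ (Nat.sqrt s.toNat : Int))

-- common per-end count: for each further element, the number of prefix sums p ∈ L
-- (L ends with the current prefix c) whose difference from the new prefix is a perfect square
def G (c : Int) (L : List Int) : List Int → Int
  | [] => 0
  | a :: rs => ((L.filter (fun p => is_square (c + a - p))).length : Int) + G (c + a) (L ++ [c + a]) rs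

-- A's loop body as a named step function (defeq to the lambda inside perfect_subarray)
def stepA (st : Int × Int × Int × PySem.Dict Int Int) (i : Int) : Int × Int × Int × PySem.Dict Int Int :=
  let curr_sum := st.1 + i
  let min_sum := min st.2.1 curr_sum
  let count := aWhile st.2.2.2 curr_sum min_sum 0 st.2.2.1
  let d := if st.2.2.2.contains curr_sum
           then st.2.2.2.insert curr_sum (st.2.2.2.getD curr_sum 0 + 1)
           else st.2.2.2.insert curr_sum 1
  (curr_sum, min_sum, count, d)

theorem isqLoop_eq_sqrt (s r : Int) (h0 : 0 ≤ r) (hr : r * r ≤ s) :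
    isqLoop s r = (Nat.sqrt s.toNat : Int) := by
  revert h0 hr
  induction r using isqLoop.induct (s := s) with
  | case1 r h ih =>
    intro h0 hr
    rw [isqLoop, dif_pos h]
    exact ih (by omega) (by nlinarith)
  | case2 r h =>
    intro h0 hr
    rw [isqLoop, dif_neg h]
    have hs : 0 ≤ s := le_trans (mul_nonneg h0 h0) hr
    have h1 : r.toNat * r.toNat ≤ s.toNat := by
      have hc : (↑(r.toNat * r.toNat) : Int) ≤ (s.toNat : Int) := by
        push_cast
        rw [Int.toNat_of_nonneg h0, Int.toNat_of_nonneg hs]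
        exact hr
      exact_mod_cast hc
    have h2 : s.toNat < (r.toNat + 1) * (r.toNat + 1) := by
      have hc : (s.toNat : Int) < ((r.toNat + 1) * (r.toNat + 1) : Nat) := by
        push_cast
        rw [Int.toNat_of_nonneg h0, Int.toNat_of_nonneg hs]
        omega
      exact_mod_cast hc
    have : Nat.sqrt s.toNat = r.toNat := by
      have ha : r.toNat ≤ Nat.sqrt s.toNat := Nat.le_sqrt.mpr h1
      have hb : Nat.sqrt s.toNat < r.toNat + 1 := Nat.sqrt_lt'.mpr (by nlinarith)
      omega
    rw [this]; omega

theorem sqrt_of_sq (j : Int) (hj : 0 ≤ j) : (Nat.sqrt ((j * j).toNat) : Int) = j := by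
  rw [Int.toNat_mul hj hj, show j.toNat * j.toNat = j.toNat ^ 2 by ring, Nat.sqrt_eq']
  omega

theorem is_square_eq_rootGe_zero (s : Int) : is_square s = rootGe 0 s := by
  unfold is_square rootGe
  by_cases hs : s < 0
  · rw [if_pos hs, eq_comm, decide_eq_false_iff_not]
    rintro ⟨h1, -⟩; omega
  · rw [if_neg hs, isqLoop_eq_sqrt s 0 le_rfl (by omega)]
    rw [Bool.eq_iff_iff, beq_iff_eq, decide_eq_true_iff]
    constructor
    · intro h; exact ⟨by omega, h, by positivity⟩
    · rintro ⟨-, h, -⟩; exact h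

theorem rootGe_self_next (j c : Int) (hj : 0 ≤ j) :
    rootGe (j + 1) (c - (c - j * j)) = false := by
  have h1 : c - (c - j * j) = j * j := by ring
  rw [h1]
  unfold rootGe
  rw [sqrt_of_sq j hj]
  simp only [decide_eq_false_iff_not]
  rintro ⟨-, -, h3⟩; omega

theorem rootGe_split (j c p : Int) (hj : 0 ≤ j) :
    rootGe j (c - p) = (decide (p = c - j * j) || rootGe (j + 1) (c - p)) := by
  by_cases hp : p = c - j * j
  · subst hp
    rw [rootGe_self_next j c hj, Bool.or_false,
      decide_eq_true (show c - j * j = c - j * j from rfl)]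
    have h1 : c - (c - j * j) = j * j := by ring
    unfold rootGe
    rw [h1, sqrt_of_sq j hj]
    apply decide_eq_true
    exact ⟨by positivity, rfl, le_rfl⟩
  · unfold rootGe
    simp only [hp, decide_false, Bool.false_or]
    apply decide_eq_decide.mpr
    constructor
    · rintro ⟨h1, h2, h3⟩
      refine ⟨h1, h2, ?_⟩
      rcases lt_or_eq_of_le h3 with h4 | h4
      · omega
      · exfalso; apply hp; rw [← h4] at h2; omega
    · rintro ⟨h1, h2, h3⟩; exact ⟨h1, h2, by omega⟩

theorem length_filter_split (L : List Int) (f h : Int → Bool) (x : Int)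
    (hf : ∀ p, f p = (decide (p = x) || h p)) (hx : h x = false) :
    ((L.filter f).length : Int) = L.count x + ((L.filter h).length : Int) := by
  induction L with
  | nil => simp
  | cons a t ih =>
    by_cases ha : a = x
    · subst ha
      rw [List.count_cons_self]
      rw [List.filter_cons_of_pos (by rw [hf a]; simp),
          List.filter_cons_of_neg (by simp [hx])]
      simp only [List.length_cons]
      push_cast
      omega
    · rw [List.count_cons_of_ne ha]
      have hfa : f a = h a := by rw [hf a]; simp [ha]
      by_cases hha : h a = true
      · rw [List.filter_cons_of_pos (by rw [hfa]; exact hha),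
            List.filter_cons_of_pos hha]
        simp only [List.length_cons]
        push_cast
        omega
      · rw [List.filter_cons_of_neg (by rw [hfa]; exact hha),
            List.filter_cons_of_neg hha]
        exact ih

theorem aWhile_eq (L : List Int) (d : PySem.Dict Int Int) (c m : Int)
    (hd : ∀ v, d.getD v 0 = (L.count v : Int)) (hm : ∀ p ∈ L, m ≤ p) :
    ∀ (j cnt : Int), 0 ≤ j →
    aWhile d c m j cnt = cnt + ((L.filter (fun p => rootGe j (c - p))).length : Int) := by
  intro j cnt
  induction j, cnt using aWhile.induct (d := d) (curr_sum := c) (min_sum := m) with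
  | case1 j cnt h cnt1 ih =>
    intro hj
    rw [aWhile, dif_pos h]
    simp only
    have hkey : (if d.contains (c - j * j) = true then cnt + d.getD (c - j * j) 0 else cnt)
        = cnt + (L.count (c - j * j) : Int) := by
      by_cases hc : d.contains (c - j * j) = true
      · rw [if_pos hc, hd]
      · rw [if_neg hc]
        have h0 := hd (c - j * j)
        rw [PySem.Dict.getD_of_not_contains d 0 (by simpa using hc)] at h0
        omega
    have hsplit := length_filter_split L (fun p => rootGe j (c - p))
        (fun p => rootGe (j + 1) (c - p)) (c - j * j)
        (fun p => rootGe_split j c p hj) (rootGe_self_next j c hj)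
    change aWhile d c m (j + 1) cnt1 = _
    have e1 : cnt1 = cnt + (L.count (c - j * j) : Int) := hkey
    rw [ih (by omega), e1, hsplit]
    ring
  | case2 j cnt h =>
    intro hj
    rw [aWhile, dif_neg h]
    have hnil : L.filter (fun p => rootGe j (c - p)) = [] := by
      rw [List.filter_eq_nil_iff]
      intro p hp
      simp only [rootGe, decide_eq_true_iff, not_and]
      rintro h1 h2
      intro h3
      have hq : (0:Int) ≤ (Nat.sqrt (c - p).toNat : Int) := by positivity
      have hpm := hm p hp
      nlinarith
    rw [hnil]
    simp

theorem foldA_eq (rest : List Int) : ∀ (c m cnt : Int) (d : PySem.Dict Int Int) (L : List Int),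
    (∀ v, d.getD v 0 = (L.count v : Int)) → (∀ p ∈ L, m ≤ p) →
    (rest.foldl stepA ((c, m, cnt, d) : Int × Int × Int × PySem.Dict Int Int)).2.2.1
      = cnt + G c L rest := by
  induction rest with
  | nil => intro c m cnt d L hd hm; simp [G]
  | cons a rs ih =>
    intro c m cnt d L hd hm
    rw [List.foldl_cons]
    simp only [stepA]
    have hw := aWhile_eq L d (c + a) (min m (c + a)) hd
      (fun p hp => le_trans (min_le_left _ _) (hm p hp)) 0 cnt le_rfl
    have hins : ∀ v, ((if d.contains (c + a) then d.insert (c + a) (d.getD (c + a) 0 + 1)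
        else d.insert (c + a) 1) : PySem.Dict Int Int).getD v 0 = ((L ++ [c + a]).count v : Int) := by
      intro v
      have hbase : (d.insert (c + a) (d.getD (c + a) 0 + 1)).getD v 0 = ((L ++ [c + a]).count v : Int) := by
        rw [PySem.Dict.getD_insert]
        by_cases hv : v = c + a
        · subst hv
          rw [hd]
          simp [List.count_append]
        · rw [if_neg hv, hd]
          simp [List.count_append, hv, eq_comm]
      by_cases hc : d.contains (c + a)
      · rw [if_pos hc]; exact hbase
      · rw [if_neg hc]
        have h0 : d.getD (c + a) 0 = 0 :=
          PySem.Dict.getD_of_not_contains d 0 (by simpa using hc)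
        rw [show (1 : Int) = d.getD (c + a) 0 + 1 by omega]
        exact hbase
    have hrec := ih (c + a) (min m (c + a)) (aWhile d (c + a) (min m (c + a)) 0 cnt)
      _ (L ++ [c + a]) hins
      (by
        intro p hp
        rcases List.mem_append.mp hp with h | h
        · exact le_trans (min_le_left _ _) (hm p h)
        · simp at h; subst h; exact min_le_right _ _)
    rw [hrec, hw, G]
    have : (L.filter (fun p => rootGe 0 (c + a - p))) = (L.filter (fun p => is_square (c + a - p))) := by
      apply List.filter_congr
      intro p _
      rw [is_square_eq_rootGe_zero]
    rw [this]
    ring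

theorem foldB_eq (rest : List Int) : ∀ (c cnt : Int) (Lb : List Int),
    (rest.foldl (fun (st : List Int × Int) x =>
      let ending := st.1.map (fun s => s + x) ++ [x]
      let count := ending.foldl (fun c s => if is_square s then c + 1 else c) st.2
      (ending, count)) (Lb.map (fun p => c - p), cnt)).2
      = cnt + G c (Lb ++ [c]) rest := by
  induction rest with
  | nil => intro c cnt Lb; simp [G]
  | cons a rs ih =>
    intro c cnt Lb
    rw [List.foldl_cons]
    simp only
    have hend : ((Lb.map (fun p => c - p)).map (fun s => s + a) ++ [a])
        = (Lb ++ [c]).map (fun p => c + a - p) := by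
      rw [List.map_map, List.map_append]
      simp only [List.map_cons, List.map_nil]
      congr 1
      · apply List.map_congr_left; intro p _; simp; ring
      · congr 1; ring
    rw [hend]
    have hcnt : ((Lb ++ [c]).map (fun p => c + a - p)).foldl
        (fun c s => if is_square s then c + 1 else c) cnt
        = cnt + (((Lb ++ [c]).filter (fun p => is_square (c + a - p))).length : Int) := by
      rw [PySem.List.foldl_if_add_one]
      rw [List.countP_map]
      rw [List.countP_eq_length_filter]
      rfl
    have := ih (c + a) (((Lb ++ [c]).map (fun p => c + a - p)).foldl
        (fun c s => if is_square s then c + 1 else c) cnt) (Lb ++ [c])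
    rw [this, hcnt, G]
    have hL : (Lb ++ [c]) ++ [c + a] = Lb ++ [c] ++ [c + a] := rfl
    ring

theorem perfect_subarray_eq_G (arr : List Int) :
    perfect_subarray arr = G 0 [0] arr := by
  have hfold : perfect_subarray arr
      = (arr.foldl stepA ((0, 0, 0, (PySem.Dict.empty.insert 0 1)) : Int × Int × Int × PySem.Dict Int Int)).2.2.1 :=
    congrArg (fun t => t.2.2.1) (PySem.List.foldl_pyRange_zero_pyGetD arr 0 stepA _)
  rw [hfold]
  have hd : ∀ v, ((PySem.Dict.empty.insert 0 1) : PySem.Dict Int Int).getD v 0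
      = (([0] : List Int).count v : Int) := by
    intro v
    rw [PySem.Dict.getD_insert]
    by_cases hv : v = 0
    · subst hv; simp
    · rw [if_neg hv]
      simp [PySem.Dict.getD_empty, hv, eq_comm]
  have := foldA_eq arr 0 0 0 (PySem.Dict.empty.insert 0 1) [0] hd
    (by intro p hp; simp at hp; omega)
  simpa using this

theorem perfect_subarray_alt_eq_G (arr : List Int) :
    perfect_subarray_alt arr = G 0 [0] arr := by
  unfold perfect_subarray_alt
  simp only
  have := foldB_eq arr 0 0 []
  simpa using this

-- ===== VERDICT (by name: the statement is the Claim_ definition above) =====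
theorem perfect_subarray_spec : Claim_equal_perfect_subarray := by
  intro arr _
  unfold Spec_perfect_subarray
  rw [perfect_subarray_eq_G, perfect_subarray_alt_eq_G]
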